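-- pv_equiv track=rewrite | github.com/smartbugs/smartbugs | sb/utils.py | str2label
-- ===== SOURCE A (Python) =====
-- def str2label(s: str) -> str:
--     """Convert string to label.
--
--     - leading non-letters are removed
--     - trailing characters that are neither letters nor digits ("other chars") are removed
--     - sequences of other chars within the string are replaced by a single underscore
--     """
--     label = ""
--     separator = False
--     has_started = False
--     for c in s:
--         if c.isalpha() or (has_started and c.isdigit()):
--             has_started = True
--             if separator:
--                 separator = False
--                 label += "_"
--             label += c
--         else:
--             separator = has_started
--     return label
-- ===== SOURCE B (Python) =====
-- def str2label(s: str) -> str: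
--     # Skip everything before the first letter, then collect maximal runs of
--     # letters/digits as tokens and join them with single underscores.
--     n = len(s)
--     i = 0
--     while i < n and not s[i].isalpha():
--         i += 1
--     tokens = []
--     while i < n:
--         c = s[i]
--         if c.isalpha() or c.isdigit():
--             j = i
--             while j < n and (s[j].isalpha() or s[j].isdigit()):
--                 j += 1
--             tokens.append(s[i:j])
--             i = j
--         else:
--             i += 1
--     return "_".join(tokens)
-- ===== Notes on version B (the rewrite author's own statement) =====
-- stated objective: simpler
-- what changed: Replaced A's three-variable state machine (pending-separator and has-started flags with incremental string building) by a split-then-join decomposition: skip to the first letter, cut the rest into maximal alphanumeric runs, and '_'.join the runs.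
import Mathlib
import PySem

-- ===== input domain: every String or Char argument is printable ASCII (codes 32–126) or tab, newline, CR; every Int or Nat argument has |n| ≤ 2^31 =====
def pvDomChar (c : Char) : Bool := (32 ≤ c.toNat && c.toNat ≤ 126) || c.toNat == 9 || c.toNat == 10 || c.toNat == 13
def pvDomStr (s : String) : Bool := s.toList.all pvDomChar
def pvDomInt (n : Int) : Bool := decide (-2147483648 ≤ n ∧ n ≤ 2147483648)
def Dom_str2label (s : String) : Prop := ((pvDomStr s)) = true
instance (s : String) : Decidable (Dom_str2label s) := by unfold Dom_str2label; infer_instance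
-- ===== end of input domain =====

-- B is the same linear cost as A, simpler by decomposition: skip-to-first-letter, cut into
-- maximal alphanumeric runs, join with "_" — instead of A's separator/has_started state machine.

-- ===== PORT A =====
-- one step of A's loop; state = (label, separator, has_started)
def str2labelStep (st : List Char × Bool × Bool) (c : Char) : List Char × Bool × Bool :=
  let (label, separator, has_started) := st
  if PySem.Chars.isalpha c || (has_started && PySem.Chars.isdigit c) then
    if separator then (label ++ ['_', c], false, true)
    else (label ++ [c], separator, true)
  else
    (label, has_started, has_started)

def str2label (s : String) : String :=
  String.ofList (s.toList.foldl str2labelStep ([], false, false)).1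

-- ===== PORT B =====
-- kept characters: letter or digit
def str2labelKeep (c : Char) : Bool := PySem.Chars.isalpha c || PySem.Chars.isdigit c

-- B's tokenizing loop: maximal runs of kept characters (inner while = takeWhile/dropWhile)
def str2labelTokens : List Char → List (List Char)
  | [] => []
  | c :: cs =>
    if str2labelKeep c then
      (c :: cs.takeWhile str2labelKeep) :: str2labelTokens (cs.dropWhile str2labelKeep)
    else
      str2labelTokens cs
termination_by cs => cs.length
decreasing_by
  · exact Nat.lt_succ_of_le (List.length_dropWhile_le str2labelKeep cs)
  · exact Nat.lt_succ_self _

def str2label_alt (s : String) : String :=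
  String.ofList
    (List.intercalate ['_']
      (str2labelTokens (s.toList.dropWhile (fun c => !PySem.Chars.isalpha c))))

-- ===== PRECONDITION & SPEC =====
def Spec_str2label (s : String) (out : String) : Prop := out = str2label_alt s
instance (s : String) (out : String) : Decidable (Spec_str2label s out) := by unfold Spec_str2label; infer_instance

-- ===== CLAIM (what is proved, stated in full; the proofs are below) =====
def Claim_equal_str2label : Prop := ∀ (s : String), Dom_str2label s → Spec_str2label s (str2label s)

-- ===== LEMMAS AND PROOFS =====

-- the suffix A appends once it has started, given the pending-separator flag
def str2labelTail : List Char → Bool → List Char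
  | [], _ => []
  | c :: cs, sep =>
    if str2labelKeep c then
      if sep then '_' :: c :: str2labelTail cs false else c :: str2labelTail cs false
    else str2labelTail cs true

theorem str2label_started (cs : List Char) :
    ∀ (label : List Char) (sep : Bool),
      (cs.foldl str2labelStep (label, sep, true)).1 = label ++ str2labelTail cs sep := by
  induction cs with
  | nil => intro label sep; simp [str2labelTail]
  | cons c cs ih =>
    intro label sep
    rw [List.foldl_cons]
    by_cases hk : str2labelKeep c = true
    · have hc : (PySem.Chars.isalpha c || (true && PySem.Chars.isdigit c)) = true := by
        simpa [str2labelKeep] using hk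
      cases sep with
      | false =>
        have hstep : str2labelStep (label, false, true) c = (label ++ [c], false, true) := by
          simp only [str2labelStep]; rw [hc]; simp
        rw [hstep, ih]
        simp [str2labelTail, hk]
      | true =>
        have hstep : str2labelStep (label, true, true) c = (label ++ ['_', c], false, true) := by
          simp only [str2labelStep]; rw [hc]; simp
        rw [hstep, ih]
        simp [str2labelTail, hk]
    · have hc : (PySem.Chars.isalpha c || (true && PySem.Chars.isdigit c)) = false := by
        simpa [str2labelKeep] using hk
      have hstep : str2labelStep (label, sep, true) c = (label, true, true) := by
        simp only [str2labelStep]; rw [hc]; simp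
      rw [hstep, ih]
      simp [str2labelTail, hk]

theorem str2label_skip (cs : List Char) :
    cs.foldl str2labelStep ([], false, false)
      = (cs.dropWhile (fun c => !PySem.Chars.isalpha c)).foldl str2labelStep ([], false, false) := by
  induction cs with
  | nil => rfl
  | cons c cs ih =>
    by_cases ha : PySem.Chars.isalpha c = true
    · simp [List.dropWhile, ha]
    · have ha' : PySem.Chars.isalpha c = false := by simpa using ha
      simp [List.dropWhile, ha', List.foldl, str2labelStep, ih]

theorem str2labelTail_false (cs : List Char) :
    str2labelTail cs false
      = cs.takeWhile str2labelKeep ++ str2labelTail (cs.dropWhile str2labelKeep) true := by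
  induction cs with
  | nil => simp [str2labelTail]
  | cons c cs ih =>
    by_cases hk : str2labelKeep c = true
    · simp [str2labelTail, hk, List.takeWhile, List.dropWhile, ih]
    · have hk' : str2labelKeep c = false := by simpa using hk
      simp [str2labelTail, hk', List.takeWhile, List.dropWhile]

theorem str2labelTail_true (cs : List Char) :
    str2labelTail cs true = (str2labelTokens cs).flatMap (fun t => '_' :: t) := by
  induction cs using str2labelTokens.induct with
  | case1 => simp [str2labelTail, str2labelTokens]
  | case2 c cs hk ih =>
    rw [str2labelTail, if_pos hk, str2labelTail_false, str2labelTokens, if_pos hk]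
    simp [ih]
  | case3 c cs hk ih =>
    have hk' : str2labelKeep c = false := by simpa using hk
    rw [str2labelTail, if_neg (by simp [hk']), str2labelTokens, if_neg (by simp [hk'])]
    exact ih

theorem intercalate_eq_flatMap (sep : List Char) (t : List Char) (ts : List (List Char)) :
    List.intercalate sep (t :: ts) = t ++ ts.flatMap (fun u => sep ++ u) := by
  induction ts generalizing t with
  | nil => simp [List.intercalate]
  | cons u ts ih =>
    have h1 : List.intercalate sep (t :: u :: ts) = t ++ sep ++ List.intercalate sep (u :: ts) := by
      simp [List.intercalate, List.intersperse, List.append_assoc]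
    rw [h1, ih u]
    simp [List.flatMap_cons, List.append_assoc]

-- ===== VERDICT (by name: the statement is the Claim_ definition above) =====
theorem str2label_spec : Claim_equal_str2label := by
  intro s _
  unfold Spec_str2label str2label str2label_alt
  rw [str2label_skip]
  cases hd : s.toList.dropWhile (fun c => !PySem.Chars.isalpha c) with
  | nil => simp [str2labelTokens, List.intercalate]
  | cons c rest =>
    have ha : PySem.Chars.isalpha c = true := by
      have := List.head_dropWhile_not (fun c => !PySem.Chars.isalpha c) (l := s.toList)
        (by simp [hd])
      simpa [hd] using this
    have hk : str2labelKeep c = true := by simp [str2labelKeep, ha]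
    rw [List.foldl_cons]
    have hstep : str2labelStep ([], false, false) c = ([c], false, true) := by
      simp [str2labelStep, ha]
    rw [hstep, str2label_started, str2labelTail_false, str2labelTail_true,
      str2labelTokens, if_pos hk, intercalate_eq_flatMap]
    simp
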